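-- pv_equiv track=rewrite | github.com/jimmynguyen/daily-programmer | python/c004i.py | get_first_operation_index
-- ===== SOURCE A (Python) =====
-- def get_first_operation_index(expression, operations):
-- 	count = 0
-- 	while expression and expression[0] in operations:
-- 		expression = expression[1:]
-- 		count += 1
-- 	min_ndx = None
-- 	for operation in operations:
-- 		if operation in expression and (min_ndx is None or min_ndx > expression.index(operation)):
-- 			min_ndx = expression.index(operation)
-- 	if min_ndx is not None:
-- 		min_ndx += count
-- 	return min_ndx
-- ===== SOURCE B (Python) =====
-- def get_first_operation_index(expression, operations):
--     ops = set(operations)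
--     n = len(expression)
--     i = 0
--     while i < n and expression[i] in ops:
--         i += 1
--     while i < n:
--         if expression[i] in ops:
--             return i
--         i += 1
--     return None
-- ===== Notes on version B (the rewrite author's own statement) =====
-- stated objective: faster
-- what changed: Replaces A's slice-and-count prefix loop (each step copies the rest of the string) plus a per-operation substring-index/min pass with one index scan: skip the leading operator run, then return the first later position whose character is in a precomputed set.
import Mathlib
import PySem

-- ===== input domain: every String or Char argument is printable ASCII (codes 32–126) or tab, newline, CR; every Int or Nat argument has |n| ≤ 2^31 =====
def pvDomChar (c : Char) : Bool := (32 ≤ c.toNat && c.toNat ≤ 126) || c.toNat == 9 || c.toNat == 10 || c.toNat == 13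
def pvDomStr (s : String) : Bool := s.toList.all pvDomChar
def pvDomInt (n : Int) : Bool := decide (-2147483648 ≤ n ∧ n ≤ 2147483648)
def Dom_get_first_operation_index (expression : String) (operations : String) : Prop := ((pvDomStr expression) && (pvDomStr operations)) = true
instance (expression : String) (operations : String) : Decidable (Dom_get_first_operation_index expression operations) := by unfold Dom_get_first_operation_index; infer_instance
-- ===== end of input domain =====

-- B replaces A's slice-and-count prefix loop + per-operation index()/min pass with a single
-- positional scan over the expression using a precomputed character set (objective: faster; measured).


-- ===== PORT A =====
-- 'while expression and expression[0] in operations: expression = expression[1:]; count += 1'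
-- (char in string = list membership for a 1-char needle)
def aStrip (ops : List Char) : List Char → Int → (List Char × Int)
  | [], count => ([], count)
  | c :: rest, count => if c ∈ ops then aStrip ops rest (count + 1) else (c :: rest, count)

-- loop body: 'if operation in expression and (min_ndx is None or min_ndx > expression.index(operation)): min_ndx = expression.index(operation)'
def aStep (e : List Char) (acc : Option Nat) (op : Char) : Option Nat :=
  if op ∈ e then
    match acc, PySem.List.index? e op with
    | none, some j => some j
    | some m, some j => if m > j then some j else some m
    | _, none => acc
  else acc

def get_first_operation_index (expression : String) (operations : String) : Option Int :=
  let ops := operations.toList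
  let (rest, count) := aStrip ops expression.toList 0
  let min_ndx := ops.foldl (aStep rest) none
  min_ndx.map (fun m => (m : Int) + count)

-- ===== PORT B =====
-- second while loop of Source B: walk forward, return the first position whose char is in ops
def altFind (mem : Char → Bool) : List Char → Int → Option Int
  | [], _ => none
  | c :: rest, i => if mem c then some i else altFind mem rest (i + 1)

-- first while loop of Source B: skip the leading run of operation characters
def altSkip (mem : Char → Bool) : List Char → Int → Option Int
  | [], _ => none
  | c :: rest, i => if mem c then altSkip mem rest (i + 1) else altFind mem (c :: rest) i

def get_first_operation_index_alt (expression : String) (operations : String) : Option Int :=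
  let ops : PySem.Set Char := PySem.Set.ofList operations.toList
  altSkip (fun c => PySem.Set.contains ops c) expression.toList 0

-- ===== PRECONDITION & SPEC =====
def Spec_get_first_operation_index (expression : String) (operations : String) (out : Option Int) : Prop := out = get_first_operation_index_alt expression operations
instance (expression : String) (operations : String) (out : Option Int) : Decidable (Spec_get_first_operation_index expression operations out) := by unfold Spec_get_first_operation_index; infer_instance

-- ===== CLAIM (what is proved, stated in full; the proofs are below) =====
def Claim_equal_get_first_operation_index : Prop := ∀ (expression : String) (operations : String), Dom_get_first_operation_index expression operations → Spec_get_first_operation_index expression operations (get_first_operation_index expression operations)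

-- ===== LEMMAS AND PROOFS =====

-- optional minimum (the value A's min_ndx update maintains)
def omin : Option Nat → Option Nat → Option Nat
  | none, b => b
  | a, none => a
  | some m, some j => some (min m j)

theorem omin_none_left (b : Option Nat) : omin none b = b := by cases b <;> rfl

theorem omin_none_right (a : Option Nat) : omin a none = a := by cases a <;> rfl

theorem omin_assoc (a b c : Option Nat) : omin (omin a b) c = omin a (omin b c) := by
  cases a <;> cases b <;> cases c <;> simp [omin, Nat.min_assoc]

theorem omin_map_succ (a b : Option Nat) :
    omin (Option.map (· + 1) a) (Option.map (· + 1) b) = Option.map (· + 1) (omin a b) := by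
  cases a <;> cases b <;> simp [omin, Nat.min_def] <;> split_ifs <;> omega

theorem aStep_eq_omin (e : List Char) (acc : Option Nat) (op : Char) :
    aStep e acc op = omin acc (PySem.List.index? e op) := by
  unfold aStep
  by_cases h : op ∈ e
  · rw [if_pos h]
    rcases h' : PySem.List.index? e op with _ | j
    · exact absurd h ((PySem.List.index?_eq_none_iff e op).mp h')
    · cases acc with
      | none => rfl
      | some m => simp only [omin]; split_ifs with hmj <;> simp [Nat.min_def] <;> omega

  · rw [if_neg h, (PySem.List.index?_eq_none_iff e op).mpr h, omin_none_right]

theorem foldl_aStep_eq (e : List Char) :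
    ∀ (ops : List Char) (acc : Option Nat),
      ops.foldl (aStep e) acc = (ops.map (PySem.List.index? e)).foldl omin acc := by
  intro ops
  induction ops with
  | nil => intro acc; rfl
  | cons o t ih =>
    intro acc
    simp only [List.foldl, List.map]
    rw [aStep_eq_omin, ih]

theorem foldl_omin_acc (l : List (Option Nat)) (a : Option Nat) :
    l.foldl omin a = omin a (l.foldl omin none) := by
  induction l generalizing a with
  | nil => simp [List.foldl, omin_none_right]
  | cons x t ih =>
    simp only [List.foldl]
    rw [ih (omin a x), ih (omin none x), omin_assoc, omin_none_left]

theorem omin_some_zero_left (b : Option Nat) : omin (some 0) b = some 0 := by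
  cases b <;> simp [omin]

theorem omin_some_zero_right (a : Option Nat) : omin a (some 0) = some 0 := by
  cases a <;> simp [omin]

theorem foldl_omin_zero_mem (l : List (Option Nat)) (h : some 0 ∈ l) :
    l.foldl omin none = some 0 := by
  induction l with
  | nil => cases h
  | cons x t ih =>
    simp only [List.foldl]
    rcases List.mem_cons.mp h with h | h
    · subst h
      rw [omin_none_left, foldl_omin_acc, omin_some_zero_left]
    · rw [foldl_omin_acc, ih h, omin_some_zero_right]

theorem foldl_omin_shift (l : List (Option Nat)) :
    (l.map (Option.map (· + 1))).foldl omin none = (l.foldl omin none).map (· + 1) := by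
  induction l with
  | nil => rfl
  | cons x t ih =>
    simp only [List.map, List.foldl, omin_none_left]
    rw [foldl_omin_acc, ih, foldl_omin_acc (l := t) (a := x), omin_map_succ]

-- A's min over 'expression.index(operation)' IS the first position whose char is an operation
theorem minOps_eq_findIdx? (ops : List Char) (e : List Char) :
    ops.foldl (aStep e) none = e.findIdx? (fun c => decide (c ∈ ops)) := by
  rw [foldl_aStep_eq]
  induction e with
  | nil =>
    rw [List.findIdx?_nil]
    induction ops with
    | nil => rfl
    | cons o t ih => simpa using ih
  | cons c rest ih =>
    rw [List.findIdx?_cons]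
    by_cases hc : c ∈ ops
    · simp only [hc, decide_true, if_true]
      apply foldl_omin_zero_mem
      exact List.mem_map.mpr ⟨c, hc, PySem.List.index?_cons_self c rest⟩
    · have hmap : ops.map (PySem.List.index? (c :: rest))
          = (ops.map (PySem.List.index? rest)).map (Option.map (· + 1)) := by
        rw [List.map_map]
        apply List.map_congr_left
        intro op hop
        have hne : c ≠ op := fun h => hc (h ▸ hop)
        exact PySem.List.index?_cons_of_ne rest hne
      rw [hmap, foldl_omin_shift, ih]
      simp [hc]

-- B's find loop computes findIdx? offset by the running index
theorem altFind_eq (mem : Char → Bool) (l : List Char) (i : Int) :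
    altFind mem l i = (l.findIdx? mem).map (fun k => i + (k : Int)) := by
  induction l generalizing i with
  | nil => rfl
  | cons c rest ih =>
    rw [List.findIdx?_cons]
    by_cases h : mem c
    · simp [altFind, h]
    · simp only [altFind, h, if_false, Bool.false_eq_true]
      rw [ih]
      rcases List.findIdx? mem rest with _ | k <;> simp
      omega

-- main invariant: A's strip-then-min equals B's skip-then-find, for any running count
theorem strip_skip_eq (ops : List Char) (mem : Char → Bool)
    (hmem : ∀ c, mem c = decide (c ∈ ops)) :
    ∀ (e : List Char) (count : Int),
      (let (rest, cnt) := aStrip ops e count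
       (ops.foldl (aStep rest) none).map (fun m => (m : Int) + cnt))
      = altSkip mem e count := by
  have hfun : mem = fun c => decide (c ∈ ops) := funext hmem
  intro e
  induction e with
  | nil =>
    intro count
    simp only [aStrip, altSkip]
    rw [minOps_eq_findIdx?, List.findIdx?_nil]
    rfl
  | cons c rest ih =>
    intro count
    by_cases hc : c ∈ ops
    · have hm : mem c = true := by rw [hmem]; simp [hc]
      simp only [aStrip, altSkip, hc, if_true, hm]
      exact ih (count + 1)
    · have hm : mem c = false := by rw [hmem]; simp [hc]
      simp only [aStrip, altSkip, hc, if_false, hm, Bool.false_eq_true]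
      rw [minOps_eq_findIdx?, altFind_eq, hfun]
      rcases List.findIdx? (fun c => decide (c ∈ ops)) (c :: rest) with _ | m <;> simp
      omega

-- ===== VERDICT (by name: the statement is the Claim_ definition above) =====
theorem get_first_operation_index_spec : Claim_equal_get_first_operation_index := by
  intro expression operations _
  unfold Spec_get_first_operation_index get_first_operation_index get_first_operation_index_alt
  have := strip_skip_eq operations.toList
      (fun c => PySem.Set.contains (PySem.Set.ofList operations.toList) c)
      (fun c => by
        by_cases h : c ∈ operations.toList
        · simp only [h, decide_true]
          exact (PySem.Set.contains_iff _ _).mpr ((PySem.Set.mem_ofList _ _).mpr h)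
        · have : ¬ c ∈ PySem.Set.ofList operations.toList := by
            rw [PySem.Set.mem_ofList]; exact h
          simp only [h, decide_false]
          exact Bool.not_eq_true _ |>.mp (fun hh => this ((PySem.Set.contains_iff _ _).mp hh))
        )
      expression.toList 0
  simpa using this
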